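-- pv_equiv track=rewrite | github.com/eistre91/ThinkPython2 | Chapter9/notes.py | uses_all
-- ===== SOURCE A (Python) =====
-- def uses_all(word, required_letters):
-- 	passes = False
-- 	for required in required_letters:
-- 		for letter in word:
-- 			if letter == required:
-- 				passes = True
-- 		if passes == False:
-- 			return False
-- 		passes = False
-- 	return True
-- ===== SOURCE B (Python) =====
-- def uses_all(word, required_letters):
--     remaining = set(required_letters)
--     for letter in word:
--         remaining.discard(letter)
--         if not remaining:
--             return True
--     return not remaining
-- ===== Notes on version B (the rewrite author's own statement) =====
-- stated objective: faster
-- what changed: Instead of looping over required letters and rescanning word for each (with a 'passes' flag), B makes a single pass over word maintaining a shrinking set of still-missing required letters, returning early once it is empty.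
import Mathlib
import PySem

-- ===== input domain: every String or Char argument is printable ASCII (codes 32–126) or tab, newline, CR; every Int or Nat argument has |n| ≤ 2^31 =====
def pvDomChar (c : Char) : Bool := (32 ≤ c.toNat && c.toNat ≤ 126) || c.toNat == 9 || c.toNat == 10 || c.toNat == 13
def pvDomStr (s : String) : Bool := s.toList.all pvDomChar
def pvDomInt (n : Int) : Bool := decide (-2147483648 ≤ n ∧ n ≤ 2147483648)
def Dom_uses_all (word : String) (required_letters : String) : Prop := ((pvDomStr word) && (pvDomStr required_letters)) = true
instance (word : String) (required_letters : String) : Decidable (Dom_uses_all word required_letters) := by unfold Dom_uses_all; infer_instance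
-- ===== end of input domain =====

-- B replaces A's nested rescan of word per required letter by one pass over word
-- maintaining the set of still-missing required letters (alternative decomposition).

-- ===== PORT A =====
-- outer loop over required letters; inner loop over word sets 'passes'
def usesAllA_loop (wordL : List Char) : List Char → Bool
  | [] => true
  | r :: rest =>
    let passes := wordL.foldl (fun p letter => if letter == r then true else p) false
    if passes == false then false else usesAllA_loop wordL rest

def uses_all (word : String) (required_letters : String) : Bool :=
  usesAllA_loop word.toList required_letters.toList

-- ===== PORT B =====
-- single pass over word, discarding each letter from the remaining set; early return on empty
def usesAllB_loop : List Char → PySem.Set Char → Bool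
  | [], remaining => remaining.isEmpty
  | letter :: rest, remaining =>
    let remaining' := PySem.Set.discard remaining letter
    if remaining'.isEmpty then true else usesAllB_loop rest remaining'

def uses_all_alt (word : String) (required_letters : String) : Bool :=
  usesAllB_loop word.toList (PySem.Set.ofList required_letters.toList)

-- ===== PRECONDITION & SPEC =====
def Spec_uses_all (word : String) (required_letters : String) (out : Bool) : Prop := out = uses_all_alt word required_letters
instance (word : String) (required_letters : String) (out : Bool) : Decidable (Spec_uses_all word required_letters out) := by unfold Spec_uses_all; infer_instance

-- ===== CLAIM =====
def Claim_equal_uses_all : Prop := ∀ (word : String) (required_letters : String), Dom_uses_all word required_letters → Spec_uses_all word required_letters (uses_all word required_letters)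

-- ===== LEMMAS AND PROOFS =====

-- A's inner loop computes "r occurs in wordL"
theorem foldA_eq_contains (wordL : List Char) (r : Char) (b : Bool) :
    wordL.foldl (fun p letter => if letter == r then true else p) b = (b || wordL.contains r) := by
  induction wordL generalizing b with
  | nil => simp
  | cons c cs ih =>
    simp only [List.foldl, List.contains_cons, ih]
    by_cases h : c = r
    · simp [h]
    · have : (r == c) = false := by simp [Ne.symm h]
      simp [h, this]

-- A's result: every required letter occurs in wordL
theorem usesAllA_spec (wordL reqL : List Char) :
    usesAllA_loop wordL reqL = reqL.all (fun r => wordL.contains r) := by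
  induction reqL with
  | nil => rfl
  | cons r rest ih =>
    simp only [usesAllA_loop, foldA_eq_contains, Bool.false_or, List.all_cons, ih]
    by_cases h : wordL.contains r = true
    · simp [h]
    · simp [Bool.not_eq_true] at h
      simp [h]

-- discarding c from the set doesn't change "all members occur in c :: cs"
theorem discard_all (rem : PySem.Set Char) (c : Char) (cs : List Char) :
    (PySem.Set.discard rem c).all (fun r => cs.contains r) = rem.all (fun r => (c :: cs).contains r) := by
  rw [Bool.eq_iff_iff]
  simp only [List.all_eq_true, PySem.Set.mem_discard]
  constructor
  · intro h r hr
    by_cases hrc : r = c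
    · simp [hrc]
    · have := h r ⟨hr, hrc⟩
      simp at this ⊢
      exact Or.inr this
  · rintro h r ⟨hr, hrc⟩
    have := h r hr
    simp [hrc] at this ⊢
    exact this

-- B's loop: result is "every remaining letter occurs in ws"
theorem usesAllB_spec (ws : List Char) (rem : PySem.Set Char) :
    usesAllB_loop ws rem = rem.all (fun r => ws.contains r) := by
  induction ws generalizing rem with
  | nil =>
    cases rem <;> simp [usesAllB_loop]
  | cons c cs ih =>
    show (if (PySem.Set.discard rem c).isEmpty then true else usesAllB_loop cs (PySem.Set.discard rem c))
        = rem.all (fun r => (c :: cs).contains r)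
    rw [← discard_all rem c cs]
    by_cases he : (PySem.Set.discard rem c).isEmpty = true
    · rw [List.isEmpty_iff] at he
      simp [he]
    · rw [if_neg he, ih]

theorem alt_eq (word required_letters : String) :
    uses_all_alt word required_letters = (required_letters.toList).all (fun r => word.toList.contains r) := by
  unfold uses_all_alt
  rw [usesAllB_spec, Bool.eq_iff_iff]
  simp only [List.all_eq_true]
  constructor
  · intro h r hr
    exact h r (by simpa [PySem.Set.mem_ofList] using hr)
  · intro h r hr
    exact h r (by simpa [PySem.Set.mem_ofList] using hr)

-- ===== VERDICT =====
theorem uses_all_spec : Claim_equal_uses_all := by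
  intro word required_letters _
  unfold Spec_uses_all
  rw [alt_eq]
  unfold uses_all
  rw [usesAllA_spec]
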